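-- pv_equiv track=rewrite | github.com/Benjamin2244/Hate-Speech-Detector | Python/TextFileParser.py | get_negative
-- ===== SOURCE A (Python) =====
-- def get_negative(text):
--     count = 0
--     try:
--         for c in text:
--             if c == '.':
--                 count += 1
--     except:
--         return 0
--     if count == 0:
--         return text[len(text) - 1]
--     elif count == 1:
--         first = text.index('.')
--         if first == 1:
--             return text[len(text) - 1]
--         else:
--             return text[first - 1:]
--     else:
--         first = text.index('.')
--         second = text.index('.', first + 1)
--         return text[second - 1:]
-- ===== SOURCE B (Python) =====
-- def get_negative(text):
--     first = None
--     try: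
--         for i, c in enumerate(text):
--             if c == '.':
--                 if first is None:
--                     first = i
--                 else:
--                     return text[i - 1:]  # second period: answer known, stop scanning
--     except:
--         return 0
--     if first is None:
--         return text[len(text) - 1]
--     if first == 1:
--         return text[len(text) - 1]
--     return text[first - 1:]
-- ===== Notes on version B (the rewrite author's own statement) =====
-- stated objective: alternative
-- what changed: B is a single short-circuit scan that returns the slice immediately when the second period is met and otherwise remembers only the first period's index, eliminating A's count pass and its separate str.index / str.index(start) re-scans.
-- outside the precondition, e.g. on get_negative(''): A raises IndexError, B raises IndexError
import Mathlib
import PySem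

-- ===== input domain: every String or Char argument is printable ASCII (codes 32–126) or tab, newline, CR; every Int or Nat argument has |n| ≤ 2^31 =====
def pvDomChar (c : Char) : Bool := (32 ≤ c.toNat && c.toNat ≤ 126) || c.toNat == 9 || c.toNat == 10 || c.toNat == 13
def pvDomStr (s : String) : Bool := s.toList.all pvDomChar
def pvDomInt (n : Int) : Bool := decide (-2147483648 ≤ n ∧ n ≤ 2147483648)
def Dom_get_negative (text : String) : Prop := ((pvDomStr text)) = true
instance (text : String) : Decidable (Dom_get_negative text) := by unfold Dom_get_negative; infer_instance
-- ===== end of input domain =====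

-- B replaces A's count pass plus str.index / str.index(start) re-scans by ONE short-circuit
-- scan that returns as soon as the second period appears and otherwise remembers only the
-- first period's index (objective: alternative decomposition, same O(n) cost).

-- ===== PORT A =====
-- literal port of A; iterating over a str never raises, so A's 'except: return 0' is unreachable
-- and is not ported.  text.index('.') is only reached when a '.' exists (count ≥ 1), where it
-- equals PySem.Str.find / PySem.Str.findFrom.  text[len(text)-1] raises IndexError on "",
-- excluded by Pre_get_negative.
def get_negative (text : String) : String :=
  let count : Int := text.toList.foldl (fun c ch => if ch == '.' then c + 1 else c) 0
  if count == 0 then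
    match PySem.Str.pyGet? text ((PySem.Str.len text : Int) - 1) with
    | some c => String.ofList [c]
    | none => ""          -- IndexError on "", outside Pre_
  else if count == 1 then
    let first := PySem.Str.find text "."
    if first == 1 then
      match PySem.Str.pyGet? text ((PySem.Str.len text : Int) - 1) with
      | some c => String.ofList [c]
      | none => ""
    else
      PySem.Str.slice text (some (first - 1)) none
  else
    let first := PySem.Str.find text "."
    let second := PySem.Str.findFrom text "." (first + 1) none
    PySem.Str.slice text (some (second - 1)) none

-- ===== PORT B =====
-- text[len(text)-1] (IndexError on "", outside Pre_)
def pvLast (text : String) : String :=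
  match PySem.Str.pyGet? text ((PySem.Str.len text : Int) - 1) with
  | some c => String.ofList [c]
  | none => ""

-- the for-loop of Source B over enumerate(text): state 'first : Option Int', early return on
-- the second period, and Source B's code after the loop in the [] case
def pvScan (text : String) (first : Option Int) : List (Int × Char) → String
  | [] =>
    match first with
    | none => pvLast text
    | some f => if f == 1 then pvLast text else PySem.Str.slice text (some (f - 1)) none
  | (i, c) :: rest =>
    if c == '.' then
      match first with
      | none => pvScan text (some i) rest
      | some _ => PySem.Str.slice text (some (i - 1)) none
    else pvScan text first rest

def get_negative_alt (text : String) : String :=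
  pvScan text none (PySem.List.enumerate text.toList 0)

-- ===== PRECONDITION & SPEC =====
-- A raises IndexError on the empty string (text[len(text)-1]); B does the same, so "" is excluded.
def Pre_get_negative (text : String) : Prop := text ≠ ""
instance (text : String) : Decidable (Pre_get_negative text) := by unfold Pre_get_negative; infer_instance
def pvWitness_get_negative : String := "a.b"

def Spec_get_negative (text : String) (out : String) : Prop := out = get_negative_alt text
instance (text : String) (out : String) : Decidable (Spec_get_negative text out) := by unfold Spec_get_negative; infer_instance

-- ===== CLAIM (what is proved, stated in full; the proofs are below) =====
def Claim_equal_get_negative : Prop := ∀ (text : String), Dom_get_negative text → Pre_get_negative text → Spec_get_negative text (get_negative text)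

-- ===== LEMMAS AND PROOFS =====

-- proof-side abstraction: the list of period positions in cs, counted from s
def pvPositions (cs : List Char) (s : Int) : List Int :=
  ((PySem.List.enumerate cs s).filter (fun p => p.2 == '.')).map Prod.fst

theorem pvPos_nil (s : Int) : pvPositions [] s = [] := rfl

theorem pvPos_cons (c : Char) (cs : List Char) (s : Int) :
    pvPositions (c :: cs) s =
      if c == '.' then s :: pvPositions cs (s + 1) else pvPositions cs (s + 1) := by
  simp only [pvPositions, PySem.List.enumerate_cons, List.filter_cons]
  by_cases h : c = '.' <;> simp [h]

theorem pvPos_mem_le {cs : List Char} {s p : Int} (h : p ∈ pvPositions cs s) : s ≤ p := by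
  induction cs generalizing s with
  | nil => simp [pvPos_nil] at h
  | cons c cs ih =>
    rw [pvPos_cons] at h
    by_cases hc : c = '.'
    · simp [hc] at h
      rcases h with h | h
      · omega
      · have := ih h; omega
    · simp [hc] at h
      have := ih h; omega

theorem pvPos_count (cs : List Char) (a s : Int) :
    cs.foldl (fun c ch => if ch == '.' then c + 1 else c) a
      = a + (pvPositions cs s).length := by
  induction cs generalizing a s with
  | nil => simp [pvPos_nil]
  | cons c cs ih =>
    rw [pvPos_cons]
    by_cases hc : c = '.'
    · simp only [List.foldl_cons, hc, beq_self_eq_true, if_true]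
      rw [ih (a + 1) (s + 1)]
      simp; omega
    · simp only [List.foldl_cons]
      rw [if_neg (by simp [hc]), ih a (s + 1)]
      simp [hc]

theorem pvPos_head {cs : List Char} {s p : Int} {r : List Int}
    (h : pvPositions cs s = p :: r) :
    ∃ k : Nat, p = s + k ∧ cs[k]? = some '.' ∧ (∀ j : Nat, j < k → cs[j]? ≠ some '.') ∧
      r = pvPositions (cs.drop (k + 1)) (p + 1) := by
  induction cs generalizing s p r with
  | nil => simp [pvPos_nil] at h
  | cons c cs ih =>
    rw [pvPos_cons] at h
    by_cases hc : c = '.'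
    · simp [hc] at h
      refine ⟨0, by omega, by simp [hc], by omega, ?_⟩
      simp [← h.1, h.2]
    · rw [if_neg (by simp [hc])] at h
      obtain ⟨k, hk, hget, hmin, hr⟩ := ih h
      refine ⟨k + 1, by push_cast; omega, by simpa using hget, ?_, ?_⟩
      · intro j hj
        cases j with
        | zero => simp [hc]
        | succ j' => simpa using hmin j' (by omega)
      · simpa using hr

-- singleton-prefix ↔ indexing
theorem pvPrefix_singleton (cs : List Char) (i : Nat) :
    ['.'] <+: cs.drop i ↔ cs[i]? = some '.' := by
  constructor
  · rintro ⟨t, ht⟩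
    rw [← List.head?_drop, ← ht]; rfl
  · intro h
    rw [← List.head?_drop] at h
    cases hd : cs.drop i with
    | nil => simp [hd] at h
    | cons x t =>
      rw [hd] at h; simp at h
      exact ⟨t, by simp [h]⟩

theorem pvFind_of_pos {cs : List Char} {p : Int} {r : List Int}
    (h : pvPositions cs 0 = p :: r) : PySem.Chars.find cs ['.'] = p := by
  obtain ⟨k, hk, hget, hmin, -⟩ := pvPos_head h
  have hinf : ['.'] <:+: cs := by
    have : ['.'] <+: cs.drop k := (pvPrefix_singleton cs k).2 hget
    exact this.isInfix.trans (List.drop_suffix k cs).isInfix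
  have hge : 0 ≤ PySem.Chars.find cs ['.'] := (PySem.Chars.find_nonneg_iff cs ['.']).2 hinf
  obtain ⟨hpre, hminf⟩ := PySem.Chars.find_spec hge
  have h1 : ¬ (PySem.Chars.find cs ['.']).toNat < k := by
    intro hlt
    exact hmin _ hlt ((pvPrefix_singleton cs _).1 hpre)
  have h2 : ¬ k < (PySem.Chars.find cs ['.']).toNat := by
    intro hlt
    exact hminf k hlt ((pvPrefix_singleton cs k).2 hget)
  omega

theorem pvPos_shift (cs : List Char) (s t : Int) :
    pvPositions cs (s + t) = (pvPositions cs s).map (· + t) := by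
  induction cs generalizing s with
  | nil => simp [pvPos_nil]
  | cons c cs ih =>
    rw [pvPos_cons, pvPos_cons]
    by_cases hc : c = '.'
    · simp only [hc, beq_self_eq_true, if_true, List.map_cons]
      rw [show s + t + 1 = (s + 1) + t by ring, ih]
    · rw [if_neg (by simp [hc]), if_neg (by simp [hc]),
        show s + t + 1 = (s + 1) + t by ring, ih]

theorem pvFindFrom {cs : List Char} {p q : Int} {r : List Int}
    (h : pvPositions cs 0 = p :: q :: r) :
    PySem.Chars.findFrom cs ['.'] (p + 1) none = q := by
  obtain ⟨k, hk, hget, -, hr⟩ := pvPos_head h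
  have hklen : k < cs.length := by
    by_contra hge
    rw [List.getElem?_eq_none (by omega)] at hget
    simp at hget
  have hp0 : p = (k : Int) := by omega
  have hshift : pvPositions (cs.drop (k + 1)) (p + 1)
      = (pvPositions (cs.drop (k + 1)) 0).map (· + (p + 1)) := by
    have := pvPos_shift (cs.drop (k + 1)) 0 (p + 1)
    simpa using this
  rw [hshift] at hr
  cases h0 : pvPositions (cs.drop (k + 1)) 0 with
  | nil => rw [h0] at hr; simp at hr
  | cons q' r'' =>
    rw [h0] at hr
    simp only [List.map_cons] at hr
    injection hr with hq htail
    have hq'0 : 0 ≤ q' := pvPos_mem_le (by rw [h0]; exact List.mem_cons_self)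
    have hfd : PySem.Chars.find (cs.drop (k + 1)) ['.'] = q' := pvFind_of_pos h0
    have hstep := PySem.Chars.findFrom_natCast cs ['.'] (k + 1) (by omega)
    rw [hfd] at hstep
    rw [hp0, show ((k : Int) + 1) = ((k + 1 : Nat) : Int) by push_cast; ring, hstep,
      if_neg (by omega)]
    push_cast
    omega

-- the scan with 'first = some f' returns B's answer as a function of the remaining positions
theorem pvScan_some (text : String) (cs : List Char) (s f : Int) :
    pvScan text (some f) (PySem.List.enumerate cs s) =
      match pvPositions cs s with
      | [] => if f == 1 then pvLast text else PySem.Str.slice text (some (f - 1)) none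
      | q :: _ => PySem.Str.slice text (some (q - 1)) none := by
  induction cs generalizing s with
  | nil => simp [PySem.List.enumerate_nil, pvPos_nil, pvScan]
  | cons c cs ih =>
    rw [PySem.List.enumerate_cons, pvPos_cons]
    by_cases hc : c = '.'
    · simp [pvScan, hc]
    · have h0 : (c == '.') = false := by simp [hc]
      rw [if_neg (by simp [hc]),
        show pvScan text (some f) ((s, c) :: PySem.List.enumerate cs (s + 1))
            = pvScan text (some f) (PySem.List.enumerate cs (s + 1)) by simp [pvScan, h0]]
      exact ih (s + 1)

-- the scan with 'first = none' returns B's answer as a function of the positions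
theorem pvScan_none (text : String) (cs : List Char) (s : Int) :
    pvScan text none (PySem.List.enumerate cs s) =
      match pvPositions cs s with
      | [] => pvLast text
      | [p] => if p == 1 then pvLast text else PySem.Str.slice text (some (p - 1)) none
      | _ :: q :: _ => PySem.Str.slice text (some (q - 1)) none := by
  induction cs generalizing s with
  | nil => simp [PySem.List.enumerate_nil, pvPos_nil, pvScan]
  | cons c cs ih =>
    rw [PySem.List.enumerate_cons, pvPos_cons]
    by_cases hc : c = '.'
    · have h1 : (c == '.') = true := by simp [hc]
      rw [if_pos h1,
        show pvScan text none ((s, c) :: PySem.List.enumerate cs (s + 1))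
            = pvScan text (some s) (PySem.List.enumerate cs (s + 1)) by simp [pvScan, h1],
        pvScan_some text cs (s + 1) s]
      cases pvPositions cs (s + 1) <;> rfl
    · have h0 : (c == '.') = false := by simp [hc]
      rw [if_neg (by simp [hc]),
        show pvScan text none ((s, c) :: PySem.List.enumerate cs (s + 1))
            = pvScan text none (PySem.List.enumerate cs (s + 1)) by simp [pvScan, h0]]
      exact ih (s + 1)

theorem pv_main (text : String) :
    get_negative text = get_negative_alt text := by
  unfold get_negative get_negative_alt
  rw [pvScan_none text text.toList 0]
  cases hp : pvPositions text.toList 0 with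
  | nil =>
    rw [pvPos_count text.toList 0 0, hp]
    simp [pvLast]
  | cons p r =>
    cases hr : r with
    | nil =>
      rw [pvPos_count text.toList 0 0, hp, hr]
      norm_num
      rw [show ".".toList = ['.'] from rfl, pvFind_of_pos (hr ▸ hp)]
      simp [pvLast]
    | cons q r' =>
      rw [pvPos_count text.toList 0 0, hp, hr]
      have hfind : PySem.Str.find text "." = p := by
        simpa using pvFind_of_pos (hr ▸ hp)
      have hff : PySem.Str.findFrom text "." (p + 1) none = q := by
        simpa using pvFindFrom (hr ▸ hp)
      simp only [List.length_cons, Nat.cast_add, Nat.cast_one, beq_iff_eq]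
      rw [if_neg (by omega), if_neg (by omega), hfind, hff]

-- ===== VERDICT (by name: the statement is the Claim_ definition above) =====
theorem get_negative_spec : Claim_equal_get_negative := by
  intro text _ _
  exact (pv_main text).symm ▸ rfl
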